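-- pv_equiv track=rewrite | github.com/harhar2000/Makers-Learning | Golden_Square/lib/tdd_depop.py | assign_buyer_to_seller
-- ===== SOURCE A (Python) =====
-- def assign_buyer_to_seller(sellers, buyers_requests):
--     seller = list(sellers.keys())[0]
--     mapping = {}
--     for (buyer, requested_item) in buyers_requests.items():
--         for (seller, items_for_sale) in sellers.items():
--             if requested_item in items_for_sale:
--                 mapping[buyer] = seller
--     return mapping
-- ===== SOURCE B (Python) =====
-- def assign_buyer_to_seller(sellers, buyers_requests):
--     # Precompute item -> seller (last seller offering the item wins), then O(1) lookups per buyer.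
--     item_to_seller = {}
--     for seller, items_for_sale in sellers.items():
--         for item in items_for_sale:
--             item_to_seller[item] = seller
--     mapping = {}
--     for buyer, requested_item in buyers_requests.items():
--         if requested_item in item_to_seller:
--             mapping[buyer] = item_to_seller[requested_item]
--     return mapping
-- ===== Notes on version B (the rewrite author's own statement) =====
-- stated objective: faster
-- what changed: Replaces the per-buyer scan over all sellers' inventories by a single precomputed item-to-seller index (last seller wins) with O(1) lookups per buyer.
import Mathlib
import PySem

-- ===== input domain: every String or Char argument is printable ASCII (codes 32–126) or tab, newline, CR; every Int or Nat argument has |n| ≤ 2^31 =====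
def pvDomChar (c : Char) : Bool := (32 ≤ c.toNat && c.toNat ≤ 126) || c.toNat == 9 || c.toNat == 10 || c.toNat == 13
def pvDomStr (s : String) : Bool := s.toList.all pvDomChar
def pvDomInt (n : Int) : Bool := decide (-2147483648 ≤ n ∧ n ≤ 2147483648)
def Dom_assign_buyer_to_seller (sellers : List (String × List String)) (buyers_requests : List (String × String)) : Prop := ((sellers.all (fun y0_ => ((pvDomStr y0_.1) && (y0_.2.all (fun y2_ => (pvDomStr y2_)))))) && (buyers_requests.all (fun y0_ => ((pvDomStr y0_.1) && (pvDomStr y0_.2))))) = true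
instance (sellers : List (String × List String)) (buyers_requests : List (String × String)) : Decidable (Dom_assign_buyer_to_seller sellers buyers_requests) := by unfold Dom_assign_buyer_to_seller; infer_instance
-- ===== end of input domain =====

-- B replaces A's per-buyer scan over every seller's inventory by one precomputed
-- item→seller index (last seller wins), queried in O(1) per buyer (objective: faster).

-- ===== PORT A =====
-- A's nested loops: for each buyer, scan ALL sellers; last seller whose items
-- contain the requested item wins (mapping[buyer] overwritten in place).
-- (A's first line 'list(sellers.keys())[0]' raises IndexError on empty sellers:
-- excluded by Pre_; the bound variable is otherwise unused.)
def assign_buyer_to_seller (sellers : List (String × List String)) (buyers_requests : List (String × String)) : List (String × String) :=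
  (buyers_requests.foldl
    (fun mapping br =>
      sellers.foldl
        (fun m s => if br.2 ∈ s.2 then m.insert br.1 s.1 else m) mapping)
    (PySem.Dict.empty : PySem.Dict String String)).items

-- ===== PORT B =====
def assign_buyer_to_seller_alt (sellers : List (String × List String)) (buyers_requests : List (String × String)) : List (String × String) :=
  let item_to_seller : PySem.Dict String String :=
    sellers.foldl (fun d s => s.2.foldl (fun d it => d.insert it s.1) d) PySem.Dict.empty
  (buyers_requests.foldl
    (fun mapping br =>
      if item_to_seller.contains br.2 then mapping.insert br.1 (item_to_seller.getD br.2 "") else mapping)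
    (PySem.Dict.empty : PySem.Dict String String)).items

-- ===== PRECONDITION & SPEC =====
-- Pre_ excludes exactly the inputs where Python A raises: an empty sellers dict
-- (IndexError from 'list(sellers.keys())[0]').
def Pre_assign_buyer_to_seller (sellers : List (String × List String)) (buyers_requests : List (String × String)) : Prop :=
  sellers ≠ []
instance (sellers : List (String × List String)) (buyers_requests : List (String × String)) : Decidable (Pre_assign_buyer_to_seller sellers buyers_requests) := by unfold Pre_assign_buyer_to_seller; infer_instance
def pvWitness_assign_buyer_to_seller : (List (String × List String)) × (List (String × String)) :=
  ([("sam", ["hat", "scarf"]), ("tia", ["hat"])], [("bob", "hat"), ("eve", "sock")])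

def Spec_assign_buyer_to_seller (sellers : List (String × List String)) (buyers_requests : List (String × String)) (out : List (String × String)) : Prop := out = assign_buyer_to_seller_alt sellers buyers_requests
instance (sellers : List (String × List String)) (buyers_requests : List (String × String)) (out : List (String × String)) : Decidable (Spec_assign_buyer_to_seller sellers buyers_requests out) := by unfold Spec_assign_buyer_to_seller; infer_instance

-- ===== CLAIM (what is proved, stated in full; the proofs are below) =====
def Claim_equal_assign_buyer_to_seller : Prop := ∀ (sellers : List (String × List String)) (buyers_requests : List (String × String)), Dom_assign_buyer_to_seller sellers buyers_requests → Pre_assign_buyer_to_seller sellers buyers_requests → Spec_assign_buyer_to_seller sellers buyers_requests (assign_buyer_to_seller sellers buyers_requests)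
-- ===== LEMMAS AND PROOFS =====

-- B's inner index fold: inserting every item of one seller's inventory.
theorem get?_insertAll (items : List String) (sel : String) (d : PySem.Dict String String) (item : String) :
    (items.foldl (fun d it => d.insert it sel) d).get? item
      = if item ∈ items then some sel else d.get? item := by
  induction items generalizing d with
  | nil => simp [List.foldl]
  | cons i rest ih =>
    simp only [List.foldl]
    rw [ih]
    by_cases h : item ∈ rest
    · simp [h]
    · by_cases h2 : item = i
      · subst h2; simp [h, PySem.Dict.get?_insert_self]
      · simp [h, h2, PySem.Dict.get?_insert]

-- Lookup in B's full item→seller index = last seller (in iteration order) whose items contain it.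
theorem get?_itemIndex (sellers : List (String × List String)) (d : PySem.Dict String String) (item : String) :
    (sellers.foldl (fun d s => s.2.foldl (fun d it => d.insert it s.1) d) d).get? item
      = ((sellers.reverse.find? (fun s => decide (item ∈ s.2))).map Prod.fst).or (d.get? item) := by
  induction sellers generalizing d with
  | nil => simp
  | cons s rest ih =>
    simp only [List.foldl, List.reverse_cons]
    rw [ih, List.find?_append]
    cases h : rest.reverse.find? (fun s => decide (item ∈ s.2)) with
    | some p => simp [h, Option.or]
    | none =>
      simp only [h, Option.map_none, Option.none_or, List.find?]
      rw [get?_insertAll]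
      by_cases hm : item ∈ s.2 <;> simp [hm]

-- A's inner fold over all sellers = one overwrite by the last matching seller, if any.
theorem foldA_inner (sellers : List (String × List String)) (m : PySem.Dict String String) (buyer item : String) :
    sellers.foldl (fun m s => if item ∈ s.2 then m.insert buyer s.1 else m) m
      = match (sellers.reverse.find? (fun s => decide (item ∈ s.2))).map Prod.fst with
        | some sel => m.insert buyer sel
        | none => m := by
  induction sellers generalizing m with
  | nil => simp
  | cons s rest ih =>
    simp only [List.foldl, List.reverse_cons]
    rw [ih, List.find?_append]
    cases h : rest.reverse.find? (fun s => decide (item ∈ s.2)) with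
    | some p =>
      simp only [h, Option.or]
      by_cases hm : item ∈ s.2
      · simp [hm, PySem.Dict.insert_insert_self]
      · simp [hm]
    | none =>
      simp only [h, Option.map_none, Option.none_or, List.find?]
      by_cases hm : item ∈ s.2 <;> simp [hm]

-- The two per-buyer step functions agree on every accumulator.
theorem step_eq (sellers : List (String × List String)) (m : PySem.Dict String String) (br : String × String) :
    sellers.foldl (fun m s => if br.2 ∈ s.2 then m.insert br.1 s.1 else m) m
      = (if (sellers.foldl (fun d s => s.2.foldl (fun d it => d.insert it s.1) d) PySem.Dict.empty).contains br.2
         then m.insert br.1 ((sellers.foldl (fun d s => s.2.foldl (fun d it => d.insert it s.1) d) PySem.Dict.empty).getD br.2 "")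
         else m) := by
  rw [foldA_inner sellers m br.1 br.2]
  rw [PySem.Dict.contains_eq_isSome_get?, PySem.Dict.getD_eq_get?_getD, get?_itemIndex]
  cases h : (sellers.reverse.find? (fun s => decide (br.2 ∈ s.2))).map Prod.fst with
  | some sel => simp [h, Option.or]
  | none => simp [h]

-- Both outer folds over the buyers agree, the steps being pointwise equal.
theorem foldl_buyers_eq (sellers : List (String × List String)) (l : List (String × String)) (m : PySem.Dict String String) :
    l.foldl (fun m br => sellers.foldl (fun m s => if br.2 ∈ s.2 then m.insert br.1 s.1 else m) m) m
      = l.foldl (fun m br =>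
          if (sellers.foldl (fun d s => s.2.foldl (fun d it => d.insert it s.1) d) PySem.Dict.empty).contains br.2
          then m.insert br.1 ((sellers.foldl (fun d s => s.2.foldl (fun d it => d.insert it s.1) d) PySem.Dict.empty).getD br.2 "")
          else m) m := by
  induction l generalizing m with
  | nil => rfl
  | cons br rest ih =>
    simp only [List.foldl_cons]
    rw [step_eq sellers m br]
    exact ih _

theorem assign_buyer_to_seller_spec : Claim_equal_assign_buyer_to_seller := by
  intro sellers buyers_requests _ _
  unfold Spec_assign_buyer_to_seller assign_buyer_to_seller assign_buyer_to_seller_alt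
  exact congrArg PySem.Dict.items (foldl_buyers_eq sellers buyers_requests _)
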